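-- pv_equiv track=rewrite | github.com/bslhrzg/cigen | src/cigen2qp.py | CIgen2QP
-- ===== SOURCE A (Python) =====
-- def CIgen2QP(c,N) :
--     ########################################################
--     #### This function transform the determinant (c)    ####
--     #### from CIgen into the form (a,b) suitable for QP ####
--     ########################################################
--
--
--     def decctoabbs(c,N):
--         # take the dec=''imal rep of determinant (c)
--         # create the corresponding binary strings a,b for
--         # spin up and down
--         a,b='',''
--         for k in range(int(N/2)):
--             ac = c & 1 #is odd ?
--             c = c // 2
--             a+='1' if ac else '0'
--
--             ab = c & 1
--             c = c // 2
--             b+='1' if ab else '0'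
--         return a,b
--
--     bsa,bsb=decctoabbs(c, N)
--     a=int(bsa,2)
--     b=int(bsb,2)
--
--     return b,a
-- ===== SOURCE B (Python) =====
-- def CIgen2QP(c, N):
--     # Horner accumulation over two-bit chunks of c: no strings, no int(str,2) reparse.
--     a = b = 0
--     for _ in range(N // 2):
--         c, r = divmod(c, 4)
--         a = 2 * a + (r & 1)
--         b = 2 * b + (r >> 1)
--     return b, a
-- ===== Notes on version B (the rewrite author's own statement) =====
-- stated objective: simpler
-- what changed: B computes both reversed-spin integers directly by Horner accumulation over two-bit divmod chunks of c, eliminating A's string building, repeated in-place halving of c, and the int(str,2) reparse.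
-- outside the precondition, e.g. on CIgen2QP(0, 0): A raises ValueError, B returns (0, 0); on CIgen2QP(5, 1): A raises ValueError, B returns (0, 0)
-- crash fix: For N < 2 A raises ValueError (int('',2) on the empty bit string); B naturally returns (0, 0). — e.g. on CIgen2QP(5, 1): A raises ValueError, B returns (0, 0)
import Mathlib
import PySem

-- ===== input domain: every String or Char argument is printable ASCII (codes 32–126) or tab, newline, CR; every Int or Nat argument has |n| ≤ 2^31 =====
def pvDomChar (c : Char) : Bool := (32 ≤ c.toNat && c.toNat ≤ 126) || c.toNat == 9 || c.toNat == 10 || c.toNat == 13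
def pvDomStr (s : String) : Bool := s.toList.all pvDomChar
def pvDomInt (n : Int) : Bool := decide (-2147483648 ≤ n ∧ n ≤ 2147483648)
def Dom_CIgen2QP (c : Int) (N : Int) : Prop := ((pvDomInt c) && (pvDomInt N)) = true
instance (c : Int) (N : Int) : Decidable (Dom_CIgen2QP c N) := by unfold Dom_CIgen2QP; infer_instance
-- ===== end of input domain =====

-- B replaces A's string-building + int(str,2) reparse by direct Horner accumulation over
-- two-bit chunks of c (objective: simpler); for N < 2 A raises ValueError (excluded by Pre_),
-- B returns (0, 0).

-- ===== PORT A =====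
-- inner loop of decctoabbs: state (c, a, b); strings as List Char
def pvA_loop : Nat → Int → List Char → List Char → List Char × List Char
  | 0, _, a, b => (a, b)
  | n + 1, c, a, b =>
      let ac := c % 2                          -- c & 1
      let c1 := PySem.Int.floordiv c 2         -- c = c // 2
      let a' := a ++ [if ac ≠ 0 then '1' else '0']
      let ab := c1 % 2                         -- c & 1
      let c2 := PySem.Int.floordiv c1 2        -- c = c // 2
      let b' := b ++ [if ab ≠ 0 then '1' else '0']
      pvA_loop n c2 a' b'

-- int(s, 2): exact here, the parsed strings contain only '0'/'1'; none models the
-- ValueError raised on the empty string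
def pvParseBin? (s : List Char) : Option Int :=
  if s = [] then none
  else some (s.foldl (fun acc ch => 2 * acc + (if ch = '1' then 1 else 0)) 0)

def CIgen2QP (c : Int) (N : Int) : Int × Int :=
  let m := (Int.tdiv N 2).toNat                -- int(N/2): truncation toward zero; ≤ 0 → empty range
  let p := pvA_loop m c [] []
  match pvParseBin? p.1, pvParseBin? p.2 with
  | some a, some b => (b, a)
  | _, _ => (0, 0)                             -- ValueError path, excluded by Pre_

-- ===== PORT B =====
-- the for-loop: state (c, a, b); two bits of c consumed per step via divmod(c, 4)
def pvB_loop : Nat → Int → Int → Int → Int × Int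
  | 0, _, a, b => (a, b)
  | n + 1, c, a, b =>
      let q := PySem.Int.floordiv c 4          -- c, r = divmod(c, 4)
      let r := PySem.Int.mod c 4
      let a' := 2 * a + r % 2                  -- a = 2*a + (r & 1)
      let b' := 2 * b + PySem.Int.floordiv r 2 -- b = 2*b + (r >> 1)
      pvB_loop n q a' b'

def CIgen2QP_alt (c : Int) (N : Int) : Int × Int :=
  let p := pvB_loop (PySem.Int.floordiv N 2).toNat c 0 0
  (p.2, p.1)

-- ===== PRECONDITION & SPEC =====
-- Pre_ excludes exactly N < 2, where A raises ValueError via int('', 2)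
def Pre_CIgen2QP (c : Int) (N : Int) : Prop := 2 ≤ N
instance (c : Int) (N : Int) : Decidable (Pre_CIgen2QP c N) := by unfold Pre_CIgen2QP; infer_instance
def pvWitness_CIgen2QP : Int × Int := (6, 4)

-- For N < 2 A raises ValueError (int('', 2) on the empty bit string); B naturally returns (0, 0).
def Raises_CIgen2QP (c : Int) (N : Int) : Prop := N < 2
instance (c : Int) (N : Int) : Decidable (Raises_CIgen2QP c N) := by unfold Raises_CIgen2QP; infer_instance
def pvRaiseWitness_CIgen2QP : Int × Int := (5, 1)
def pvRaiseWitnessOut_CIgen2QP : Int × Int := (0, 0)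

def Spec_CIgen2QP (c : Int) (N : Int) (out : Int × Int) : Prop := out = CIgen2QP_alt c N
instance (c : Int) (N : Int) (out : Int × Int) : Decidable (Spec_CIgen2QP c N out) := by unfold Spec_CIgen2QP; infer_instance

-- ===== CLAIM (what is proved, stated in full; the proofs are below) =====
def Claim_equal_CIgen2QP : Prop := ∀ (c : Int) (N : Int), Dom_CIgen2QP c N → Pre_CIgen2QP c N → Spec_CIgen2QP c N (CIgen2QP c N)
def Claim_raises_CIgen2QP : Prop := (∀ (c : Int) (N : Int), Dom_CIgen2QP c N → Raises_CIgen2QP c N → ¬ Pre_CIgen2QP c N) ∧ (Dom_CIgen2QP (pvRaiseWitness_CIgen2QP.1) (pvRaiseWitness_CIgen2QP.2) ∧ Raises_CIgen2QP (pvRaiseWitness_CIgen2QP.1) (pvRaiseWitness_CIgen2QP.2) ∧ CIgen2QP_alt (pvRaiseWitness_CIgen2QP.1) (pvRaiseWitness_CIgen2QP.2) = pvRaiseWitnessOut_CIgen2QP)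

-- ===== LEMMAS AND PROOFS =====

-- the character lists A's loop builds, as pure functions of the starting c
def pvAchars : Nat → Int → List Char
  | 0, _ => []
  | n + 1, c => (if c % 2 ≠ 0 then '1' else '0') :: pvAchars n (PySem.Int.floordiv c 4)

def pvBchars : Nat → Int → List Char
  | 0, _ => []
  | n + 1, c => (if PySem.Int.floordiv c 2 % 2 ≠ 0 then '1' else '0') :: pvBchars n (PySem.Int.floordiv c 4)

lemma pv_fd_fd (c : Int) : PySem.Int.floordiv (PySem.Int.floordiv c 2) 2 = PySem.Int.floordiv c 4 := by
  rw [PySem.Int.floordiv_eq_ediv_of_pos (by norm_num : (0:Int) < 2),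
      PySem.Int.floordiv_eq_ediv_of_pos (by norm_num : (0:Int) < 2),
      PySem.Int.floordiv_eq_ediv_of_pos (by norm_num : (0:Int) < 4),
      Int.ediv_ediv_of_nonneg (by norm_num)]
  norm_num

lemma pvA_loop_spec : ∀ (n : Nat) (c : Int) (a b : List Char),
    pvA_loop n c a b = (a ++ pvAchars n c, b ++ pvBchars n c) := by
  intro n
  induction n with
  | zero => intro c a b; simp [pvA_loop, pvAchars, pvBchars]
  | succ n ih =>
      intro c a b
      simp only [pvA_loop, pvAchars, pvBchars, ih, pv_fd_fd, List.append_assoc,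
        List.singleton_append]

def pvHorner (a0 : Int) (l : List Char) : Int :=
  l.foldl (fun acc ch => 2 * acc + (if ch = '1' then 1 else 0)) a0

lemma pv_val_mod2 (c : Int) :
    (if (if c % 2 ≠ 0 then '1' else '0') = '1' then (1:Int) else 0) = c % 2 := by
  have h := Int.emod_two_eq c
  rcases h with h | h <;> simp [h]

lemma pvB_loop_spec : ∀ (n : Nat) (c : Int) (a0 b0 : Int),
    pvB_loop n c a0 b0 = (pvHorner a0 (pvAchars n c), pvHorner b0 (pvBchars n c)) := by
  intro n
  induction n with
  | zero => intro c a0 b0; simp [pvB_loop, pvHorner, pvAchars, pvBchars]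
  | succ n ih =>
      intro c a0 b0
      have h4 : PySem.Int.mod c 4 = c % 4 :=
        PySem.Int.mod_eq_emod_of_pos (by norm_num)
      have hlow : PySem.Int.mod c 4 % 2 = c % 2 := by
        rw [h4]; omega
      have hhigh : PySem.Int.floordiv (PySem.Int.mod c 4) 2 = PySem.Int.floordiv c 2 % 2 := by
        rw [h4, PySem.Int.floordiv_eq_ediv_of_pos (by norm_num : (0:Int) < 2),
            PySem.Int.floordiv_eq_ediv_of_pos (by norm_num : (0:Int) < 2)]
        omega
      show pvB_loop n (PySem.Int.floordiv c 4)
            (2 * a0 + PySem.Int.mod c 4 % 2)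
            (2 * b0 + PySem.Int.floordiv (PySem.Int.mod c 4) 2) = _
      rw [ih, hlow, hhigh]
      simp only [pvAchars, pvBchars, pvHorner, List.foldl_cons, pv_val_mod2,
        pv_val_mod2 (PySem.Int.floordiv c 2)]

lemma pvAchars_ne_nil (n : Nat) (c : Int) (h : 0 < n) : pvAchars n c ≠ [] := by
  cases n with
  | zero => omega
  | succ n => simp [pvAchars]

lemma pvBchars_ne_nil (n : Nat) (c : Int) (h : 0 < n) : pvBchars n c ≠ [] := by
  cases n with
  | zero => omega
  | succ n => simp [pvBchars]

-- ===== VERDICT (by name: the statement is the Claim_ definition above) =====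
theorem CIgen2QP_spec : Claim_equal_CIgen2QP := by
  intro c N _ hPre
  unfold Spec_CIgen2QP CIgen2QP CIgen2QP_alt
  have hN : (2:Int) ≤ N := hPre
  have htd : Int.tdiv N 2 = PySem.Int.floordiv N 2 := by
    rw [PySem.Int.floordiv_eq_ediv_of_pos (by norm_num : (0:Int) < 2),
        Int.tdiv_eq_ediv_of_nonneg (by omega)]
  rw [htd]
  set m := (PySem.Int.floordiv N 2).toNat with hm
  have hmpos : 0 < m := by
    rw [hm, PySem.Int.floordiv_eq_ediv_of_pos (by norm_num : (0:Int) < 2)]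
    omega
  simp only [pvA_loop_spec, List.nil_append, pvB_loop_spec]
  rw [pvParseBin?, pvParseBin?]
  rw [if_neg (pvAchars_ne_nil m c hmpos), if_neg (pvBchars_ne_nil m c hmpos)]
  rfl

@[simp] theorem CIgen2QP_raises : Claim_raises_CIgen2QP := by
  unfold Claim_raises_CIgen2QP
  exact ⟨fun c N _ hR hPre => absurd hPre
    (by unfold Pre_CIgen2QP; unfold Raises_CIgen2QP at hR; omega), by decide⟩
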